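-- pv_equiv track=rewrite | github.com/xyltec/python1-2023 | src/algo/z12/task_a.py | get_min_number_of_operations
-- ===== SOURCE A (Python) =====
-- def get_min_number_of_operations(a: list[int]) -> int:
--     count = 0
--     start = 0
--     end = len(a) - 1
--
--     while start <= end:
--         while start <= end and a[start] >= 0:
--             start += 1
--
--         while start <= end and a[end] >= 0:
--             end -= 1
--
--         if start <= end:
--             count += 1
--             for i in range(start, end+1):
--                 a[i] = -a[i]
--
--     return count
-- ===== SOURCE B (Python) =====
-- def get_min_number_of_operations(a: list[int]) -> int:
--     # One pass: count entries into a "negative block", where zeros neither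
--     # start nor end a block (negating a zero is free, so zero-separated
--     # negative stretches are fixed by one operation).
--     count = 0
--     in_neg = False
--     for x in a:
--         if x < 0:
--             if not in_neg:
--                 count += 1
--             in_neg = True
--         elif x > 0:
--             in_neg = False
--     return count
-- ===== Notes on version B (the rewrite author's own statement) =====
-- stated objective: faster
-- what changed: A repeatedly rescans the array from both ends and negates the segment between the first and last negative element until none remain; B makes a single left-to-right pass counting entries into negative blocks (zeros, whose negation is free, neither start nor end a block), and B does not mutate the input list while A negates it in place.
import Mathlib
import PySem

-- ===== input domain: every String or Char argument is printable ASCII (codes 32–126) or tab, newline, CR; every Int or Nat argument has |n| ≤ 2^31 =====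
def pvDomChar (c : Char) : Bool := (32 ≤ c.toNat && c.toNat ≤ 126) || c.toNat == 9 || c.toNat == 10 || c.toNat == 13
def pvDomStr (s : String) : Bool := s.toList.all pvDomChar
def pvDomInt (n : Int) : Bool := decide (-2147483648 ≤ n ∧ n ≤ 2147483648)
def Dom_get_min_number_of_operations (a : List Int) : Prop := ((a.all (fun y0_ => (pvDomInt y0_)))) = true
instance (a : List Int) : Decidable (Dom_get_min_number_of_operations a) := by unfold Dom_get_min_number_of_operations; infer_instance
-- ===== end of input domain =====

-- B replaces A's repeated scan-and-negate passes (O(n^2)) by one linear pass counting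
-- entries into zero-bridged negative blocks; equivalence is about the RETURN value only
-- (Python A also negates the list's elements in place, B does not mutate its argument).

-- ===== PORT A =====
-- inner 'while start <= end and a[start] >= 0: start += 1'
def pvScanStart (a : List Int) (s e : Int) : Int :=
  if h : s ≤ e ∧ 0 ≤ PySem.List.pyGetD a s 0 then pvScanStart a (s + 1) e else s
termination_by (e + 1 - s).toNat
decreasing_by omega

-- inner 'while start <= end and a[end] >= 0: end -= 1'
def pvScanEnd (a : List Int) (s e : Int) : Int :=
  if h : s ≤ e ∧ 0 ≤ PySem.List.pyGetD a e 0 then pvScanEnd a s (e - 1) else e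
termination_by (e + 1 - s).toNat
decreasing_by omega

-- 'for i in range(start, end+1): a[i] = -a[i]'
def pvNegLoop (a : List Int) (s e : Int) : List Int :=
  (PySem.List.pyRange s (e + 1) 1).foldl
    (fun acc i => PySem.List.pySetD acc i (-(PySem.List.pyGetD acc i 0))) a

-- the outer 'while start <= end' loop; fuel: each pass strictly advances start past a
-- negated element, so len+2 passes always suffice (proved in pvOuter_eq below)
def pvOuter (fuel : Nat) (a : List Int) (s e c : Int) : Int :=
  match fuel with
  | 0 => c
  | fuel + 1 =>
    if s ≤ e then
      let s' := pvScanStart a s e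
      let e' := pvScanEnd a s' e
      if s' ≤ e' then pvOuter fuel (pvNegLoop a s' e') s' e' (c + 1) else c
    else c

def get_min_number_of_operations (a : List Int) : Int :=
  pvOuter (a.length + 2) a 0 ((a.length : Int) - 1) 0

-- ===== PORT B =====
def get_min_number_of_operations_alt (a : List Int) : Int :=
  (a.foldl
    (fun (st : Int × Bool) x =>
      if x < 0 then (if st.2 then st.1 else st.1 + 1, true)
      else if x > 0 then (st.1, false)
      else st)
    (0, false)).1

-- ===== PRECONDITION & SPEC =====
def Spec_get_min_number_of_operations (a : List Int) (out : Int) : Prop := out = get_min_number_of_operations_alt a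
instance (a : List Int) (out : Int) : Decidable (Spec_get_min_number_of_operations a out) := by unfold Spec_get_min_number_of_operations; infer_instance

-- ===== CLAIM (what is proved, stated in full; the proofs are below) =====
def Claim_equal_get_min_number_of_operations : Prop := ∀ (a : List Int), Dom_get_min_number_of_operations a → Spec_get_min_number_of_operations a (get_min_number_of_operations a)

-- ===== LEMMAS AND PROOFS =====

-- the slice a[s..e] (inclusive) as a list
def pvSeg (a : List Int) (s e : Int) : List Int := (a.drop s.toNat).take (e + 1 - s).toNat

-- number of zero-bridged negative blocks, state b = "currently inside a block"
def pvRuns : Bool → List Int → Int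
  | _, [] => 0
  | b, x :: xs =>
    if x < 0 then (if b then 0 else 1) + pvRuns true xs
    else if x > 0 then pvRuns false xs
    else pvRuns b xs

theorem pvRuns_cons (b : Bool) (x : Int) (xs : List Int) :
    pvRuns b (x :: xs) =
      if x < 0 then ((if b then 0 else 1) : Int) + pvRuns true xs
      else if x > 0 then pvRuns false xs else pvRuns b xs := rfl

theorem pvAlt_foldl (l : List Int) (c : Int) (b : Bool) :
    (l.foldl
      (fun (st : Int × Bool) x =>
        if x < 0 then (if st.2 then st.1 else st.1 + 1, true)
        else if x > 0 then (st.1, false)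
        else st)
      (c, b)).1 = c + pvRuns b l := by
  induction l generalizing c b with
  | nil => simp [pvRuns]
  | cons x xs ih =>
    by_cases hx : x < 0
    · cases b <;> simp [pvRuns, hx, ih] <;> ring
    · by_cases hp : x > 0
      · simp [pvRuns, hx, hp, ih]
      · simp [pvRuns, hx, hp, ih]

theorem pvSeg_nil (a : List Int) (s e : Int) (h : e < s) : pvSeg a s e = [] := by
  have : (e + 1 - s).toNat = 0 := by omega
  simp [pvSeg, this]

theorem pvSeg_cons (a : List Int) (s e : Int) (h0 : 0 ≤ s) (h1 : s ≤ e) (h2 : e < (a.length : Int)) :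
    pvSeg a s e = PySem.List.pyGetD a s 0 :: pvSeg a (s + 1) e := by
  have hs : s.toNat < a.length := by omega
  have h3 : (e + 1 - s).toNat = (e + 1 - (s + 1)).toNat + 1 := by omega
  have h4 : (s + 1).toNat = s.toNat + 1 := by omega
  rw [pvSeg, pvSeg, List.drop_eq_getElem_cons hs, h3, h4, List.take_succ_cons,
      PySem.List.pyGetD_eq_getElem a 0 h0 (by omega)]

theorem pvSeg_snoc (a : List Int) (s e : Int) (h0 : 0 ≤ s) (h1 : s ≤ e) (h2 : e < (a.length : Int)) :
    pvSeg a s e = pvSeg a s (e - 1) ++ [PySem.List.pyGetD a e 0] := by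
  have hk : (e + 1 - s).toNat = (e - s).toNat + 1 := by omega
  have hk2 : (e - 1 + 1 - s).toNat = (e - s).toNat := by omega
  have he : s.toNat + (e - s).toNat = e.toNat := by omega
  have he2 : e.toNat < a.length := by omega
  rw [pvSeg, pvSeg, hk, hk2, List.take_succ, List.getElem?_drop, he,
      List.getElem?_eq_getElem he2, PySem.List.pyGetD_eq_getElem a 0 (by omega) h2]
  simp

theorem pvScanStart_ge (a : List Int) (s e : Int) : s ≤ pvScanStart a s e := by
  induction s using pvScanStart.induct a e with
  | case1 s h ih => rw [pvScanStart, dif_pos h]; omega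
  | case2 s h => rw [pvScanStart, dif_neg h]

theorem pvScanStart_stop (a : List Int) (s e : Int) (h : pvScanStart a s e ≤ e) :
    PySem.List.pyGetD a (pvScanStart a s e) 0 < 0 := by
  revert h
  induction s using pvScanStart.induct a e with
  | case1 s h1 ih => rw [pvScanStart, dif_pos h1]; exact ih
  | case2 s h1 =>
    rw [pvScanStart, dif_neg h1]
    intro h
    push_neg at h1
    have := h1 h
    omega

theorem pvScanEnd_le (a : List Int) (s e : Int) : pvScanEnd a s e ≤ e := by
  induction e using pvScanEnd.induct a s with
  | case1 e h ih => rw [pvScanEnd, dif_pos h]; omega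
  | case2 e h => rw [pvScanEnd, dif_neg h]

theorem pvScanEnd_ge (a : List Int) (s e : Int) (h0 : s ≤ e + 1) : s - 1 ≤ pvScanEnd a s e := by
  revert h0
  induction e using pvScanEnd.induct a s with
  | case1 e h ih => intro _; rw [pvScanEnd, dif_pos h]; exact ih (by omega)
  | case2 e h => intro h0; rw [pvScanEnd, dif_neg h]; omega

theorem pvScanStart_le (a : List Int) (s e : Int) (h0 : s ≤ e + 1) : pvScanStart a s e ≤ e + 1 := by
  revert h0
  induction s using pvScanStart.induct a e with
  | case1 s h ih => intro _; rw [pvScanStart, dif_pos h]; exact ih (by omega)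
  | case2 s h => intro h0; rw [pvScanStart, dif_neg h]; omega

theorem pvScanEnd_stop (a : List Int) (s e : Int) (h : s ≤ pvScanEnd a s e) :
    PySem.List.pyGetD a (pvScanEnd a s e) 0 < 0 := by
  revert h
  induction e using pvScanEnd.induct a s with
  | case1 e h1 ih => rw [pvScanEnd, dif_pos h1]; exact ih
  | case2 e h1 =>
    rw [pvScanEnd, dif_neg h1]
    intro h
    push_neg at h1
    have := h1 h
    omega

-- dropping the scanned nonnegative prefix does not change the count
theorem pvRuns_scanStart (a : List Int) (s e : Int) (h0 : 0 ≤ s) (h2 : e < (a.length : Int)) :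
    pvRuns false (pvSeg a s e) = pvRuns false (pvSeg a (pvScanStart a s e) e) := by
  revert h0
  induction s using pvScanStart.induct a e with
  | case1 s h ih =>
    intro h0
    rw [pvScanStart, dif_pos h]
    rw [pvSeg_cons a s e h0 h.1 h2]
    have hx : ¬ (PySem.List.pyGetD a s 0 < 0) := by omega
    rw [pvRuns]
    simp only [if_neg hx]
    split_ifs <;> exact ih (by omega)
  | case2 s h => intro _; rw [pvScanStart, dif_neg h]

-- a nonnegative last element never changes the count
theorem pvRuns_snoc_nonneg (l : List Int) (b : Bool) (x : Int) (hx : 0 ≤ x) :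
    pvRuns b (l ++ [x]) = pvRuns b l := by
  induction l generalizing b with
  | nil =>
    have hx' : ¬ (x < 0) := by omega
    simp only [List.nil_append, pvRuns]
    split_ifs <;> rfl
  | cons y ys ih =>
    simp only [List.cons_append, pvRuns]
    split_ifs <;> simp [ih]

-- dropping the scanned nonnegative suffix does not change the count
theorem pvRuns_scanEnd (a : List Int) (s e : Int) (b : Bool) (h0 : 0 ≤ s) (h2 : e < (a.length : Int)) :
    pvRuns b (pvSeg a s e) = pvRuns b (pvSeg a s (pvScanEnd a s e)) := by
  revert h2
  induction e using pvScanEnd.induct a s with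
  | case1 e h ih =>
    intro h2
    rw [pvScanEnd, dif_pos h]
    rw [pvSeg_snoc a s e h0 h.1 h2, pvRuns_snoc_nonneg _ _ _ h.2]
    exact ih (by omega)
  | case2 e h => intro _; rw [pvScanEnd, dif_neg h]

-- negation flip: with a negative last element, negating everything turns state-true counts
-- into state-false counts and removes exactly one block from state-false counts
theorem pvRuns_neg_aux (l : List Int) (x : Int) (hl : l.getLast? = some x) (hx : x < 0) :
    pvRuns true l = pvRuns false (l.map (fun y => -y)) ∧
    pvRuns false l = 1 + pvRuns true (l.map (fun y => -y)) := by
  induction l with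
  | nil => simp at hl
  | cons y ys ih =>
    have unf : ∀ (b : Bool) (x : Int) (xs : List Int),
        pvRuns b (x :: xs) =
          if x < 0 then ((if b then 0 else 1) : Int) + pvRuns true xs
          else if x > 0 then pvRuns false xs else pvRuns b xs := fun _ _ _ => rfl
    cases ys with
    | nil =>
      have hxy : y = x := by simpa using hl
      subst hxy
      have h1 : ¬ (-y < 0) := by omega
      have h2 : (0:Int) < -y := by omega
      constructor <;> simp [unf, hx, h1, h2, pvRuns] <;> omega
    | cons z zs =>
      rw [List.getLast?_cons_cons] at hl
      obtain ⟨ih1, ih2⟩ := ih hl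
      simp [List.map_cons, pvRuns_cons] at ih1 ih2 ⊢
      constructor <;> split_ifs at ih1 ih2 ⊢ <;> linarith

theorem pvRuns_flip (l : List Int) (x y : Int) (hh : l.head? = some x) (hx : x < 0)
    (hl : l.getLast? = some y) (hy : y < 0) :
    pvRuns false l = 1 + pvRuns false (l.map (fun z => -z)) := by
  obtain ⟨ih1, ih2⟩ := pvRuns_neg_aux l y hl hy
  rw [ih2]
  cases l with
  | nil => simp at hh
  | cons w ws =>
    have hw : w = x := by simpa using hh
    subst hw
    have h3 : ¬ (0 < w) := by omega
    simp [pvRuns_cons, hx, h3]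

theorem pvNegLoop_nil (a : List Int) (s e : Int) (h : e < s) : pvNegLoop a s e = a := by
  have h1 : (e + 1 - s).toNat = 0 := by omega
  rw [pvNegLoop, PySem.List.pyRange_one, h1]
  simp

theorem pvNegLoop_step (a : List Int) (s e : Int) (h : s ≤ e) :
    pvNegLoop a s e =
      pvNegLoop (PySem.List.pySetD a s (-(PySem.List.pyGetD a s 0))) (s + 1) e := by
  rw [pvNegLoop, PySem.List.pyRange_one_cons (by omega), List.foldl_cons]
  rfl

theorem pvNegLoop_length (a : List Int) (s e : Int) :
    (pvNegLoop a s e).length = a.length := by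
  suffices H : ∀ (k : Nat) (a : List Int) (s : Int), (e + 1 - s).toNat = k →
      (pvNegLoop a s e).length = a.length from H _ a s rfl
  intro k
  induction k with
  | zero => intro a s hk; rw [pvNegLoop_nil a s e (by omega)]
  | succ k ih =>
    intro a s hk
    rw [pvNegLoop_step a s e (by omega), ih _ _ (by omega), PySem.List.length_pySetD]

theorem pvGetD_setD (a : List Int) (sIdx v : Int) (hs : 0 ≤ sIdx) :
    ∀ j : Int, 0 ≤ j → j < (a.length : Int) →
      PySem.List.pyGetD (PySem.List.pySetD a sIdx v) j 0 =
        if j = sIdx then v else PySem.List.pyGetD a j 0 := by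
  intro j hj0 hj1
  rw [PySem.List.pySetD_of_nonneg a v hs,
      PySem.List.pyGetD_eq_getElem _ 0 hj0 (by simpa using hj1),
      List.getElem_set]
  by_cases hjs : j = sIdx
  · rw [if_pos (by omega), if_pos hjs]
  · rw [if_neg (by omega), if_neg hjs, PySem.List.pyGetD_eq_getElem a 0 hj0 hj1]

theorem pvNegLoop_getD (a : List Int) (s e i : Int) (h0 : 0 ≤ s) (h2 : e < (a.length : Int))
    (hi0 : 0 ≤ i) (hi1 : i < (a.length : Int)) :
    PySem.List.pyGetD (pvNegLoop a s e) i 0 =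
      if s ≤ i ∧ i ≤ e then -(PySem.List.pyGetD a i 0) else PySem.List.pyGetD a i 0 := by
  suffices H : ∀ (k : Nat) (a : List Int) (s : Int), 0 ≤ s → e < (a.length : Int) →
      i < (a.length : Int) → (e + 1 - s).toNat = k →
      PySem.List.pyGetD (pvNegLoop a s e) i 0 =
        if s ≤ i ∧ i ≤ e then -(PySem.List.pyGetD a i 0) else PySem.List.pyGetD a i 0 from
    H _ a s h0 h2 hi1 rfl
  intro k
  induction k with
  | zero =>
    intro a s h0 h2 hi1 hk
    rw [pvNegLoop_nil a s e (by omega), if_neg (by omega)]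
  | succ k ih =>
    intro a s h0 h2 hi1 hk
    have hse : s ≤ e := by omega
    rw [pvNegLoop_step a s e hse]
    have hlen : (PySem.List.pySetD a s (-(PySem.List.pyGetD a s 0))).length = a.length :=
      PySem.List.length_pySetD a s _
    rw [ih _ (s + 1) (by omega) (by rw [hlen]; exact h2) (by rw [hlen]; exact hi1) (by omega)]
    rw [pvGetD_setD a s (-(PySem.List.pyGetD a s 0)) h0 i hi0 hi1]
    by_cases his : i = s
    · subst his
      rw [if_neg (by omega), if_pos rfl, if_pos (by omega : i ≤ i ∧ i ≤ e)]
    · rw [if_neg his]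
      split_ifs <;> first | rfl | omega

theorem pvSeg_negLoop_aux (a : List Int) (s0 e : Int) (h00 : 0 ≤ s0) (h2 : e < (a.length : Int)) :
    ∀ s, s0 ≤ s → pvSeg (pvNegLoop a s0 e) s e = (pvSeg a s e).map (fun z => -z) := by
  suffices H : ∀ (k : Nat) (s : Int), s0 ≤ s → (e + 1 - s).toNat = k →
      pvSeg (pvNegLoop a s0 e) s e = (pvSeg a s e).map (fun z => -z) from
    fun s hs => H _ s hs rfl
  intro k
  induction k with
  | zero =>
    intro sIdx hs hk
    rw [pvSeg_nil _ _ _ (by omega), pvSeg_nil _ _ _ (by omega)]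
    rfl
  | succ k ih =>
    intro sIdx hs hk
    have hse : sIdx ≤ e := by omega
    have hlen : (pvNegLoop a s0 e).length = a.length := pvNegLoop_length a s0 e
    rw [pvSeg_cons _ sIdx e (by omega) hse (by rw [hlen]; exact h2),
        pvSeg_cons a sIdx e (by omega) hse h2, List.map_cons,
        pvNegLoop_getD a s0 e sIdx h00 h2 (by omega) (by omega), if_pos ⟨hs, hse⟩,
        ih (sIdx + 1) (by omega) (by omega)]

theorem pvSeg_negLoop (a : List Int) (s e : Int) (h0 : 0 ≤ s) (h2 : e < (a.length : Int)) :
    pvSeg (pvNegLoop a s e) s e = (pvSeg a s e).map (fun z => -z) :=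
  pvSeg_negLoop_aux a s e h0 h2 s le_rfl

theorem pvOuter_eq (fuel : Nat) (a : List Int) (s e c : Int) (h0 : 0 ≤ s) (h2 : e < (a.length : Int))
    (hf : (e + 1 - s) + (if PySem.List.pyGetD a s 0 < 0 then 1 else 0) < (fuel : Int)) :
    pvOuter fuel a s e c = c + pvRuns false (pvSeg a s e) := by
  induction fuel generalizing a s e c with
  | zero =>
    have hes : e < s := by split_ifs at hf <;> omega
    rw [pvSeg_nil a s e hes]
    simp [pvOuter, pvRuns]
  | succ fuel ih =>
    simp only [pvOuter]
    by_cases hse : s ≤ e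
    · rw [if_pos hse]
      set s' := pvScanStart a s e with hs'
      set e' := pvScanEnd a s' e with he'
      have hs1 : s ≤ s' := pvScanStart_ge a s e
      have hs2 : s' ≤ e + 1 := pvScanStart_le a s e (by omega)
      have he1 : e' ≤ e := pvScanEnd_le a s' e
      have he2 : s' - 1 ≤ e' := pvScanEnd_ge a s' e (by omega)
      have hr1 : pvRuns false (pvSeg a s e) = pvRuns false (pvSeg a s' e) :=
        pvRuns_scanStart a s e h0 h2
      have hr2 : pvRuns false (pvSeg a s' e) = pvRuns false (pvSeg a s' e') :=
        pvRuns_scanEnd a s' e false (by omega) h2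
      by_cases hcore : s' ≤ e'
      · rw [if_pos hcore]
        have hstop1 : PySem.List.pyGetD a s' 0 < 0 := pvScanStart_stop a s e (by omega)
        have hstop2 : PySem.List.pyGetD a e' 0 < 0 := pvScanEnd_stop a s' e (by omega)
        have hcons := pvSeg_cons a s' e' (by omega) hcore (by omega)
        have hsnoc := pvSeg_snoc a s' e' (by omega) hcore (by omega)
        have hhead : (pvSeg a s' e').head? = some (PySem.List.pyGetD a s' 0) := by
          rw [hcons]; rfl
        have hlast : (pvSeg a s' e').getLast? = some (PySem.List.pyGetD a e' 0) := by
          rw [hsnoc]; simp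
        have hflip := pvRuns_flip (pvSeg a s' e') _ _ hhead hstop1 hlast hstop2
        have hnseg : pvSeg (pvNegLoop a s' e') s' e' = (pvSeg a s' e').map (fun z => -z) :=
          pvSeg_negLoop a s' e' (by omega) (by omega)
        have hlen' : (pvNegLoop a s' e').length = a.length := pvNegLoop_length a s' e'
        have hgd : PySem.List.pyGetD (pvNegLoop a s' e') s' 0 = -(PySem.List.pyGetD a s' 0) := by
          rw [pvNegLoop_getD a s' e' s' (by omega) (by omega) (by omega) (by omega),
              if_pos ⟨le_rfl, hcore⟩]
        have hd' : ¬ (PySem.List.pyGetD (pvNegLoop a s' e') s' 0 < 0) := by rw [hgd]; omega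
        have hfm : (e' + 1 - s') + (if PySem.List.pyGetD (pvNegLoop a s' e') s' 0 < 0 then 1 else 0) < (fuel : Int) := by
          rw [if_neg hd']
          by_cases hd : PySem.List.pyGetD a s 0 < 0
          · rw [if_pos hd] at hf; push_cast at hf; omega
          · have hstep : pvScanStart a s e = pvScanStart a (s + 1) e := by
              rw [pvScanStart, dif_pos ⟨hse, by omega⟩]
            have hge1 := pvScanStart_ge a (s + 1) e
            rw [if_neg hd] at hf
            push_cast at hf
            omega
        rw [ih (pvNegLoop a s' e') s' e' (c + 1) (by omega) (by rw [hlen']; exact (by omega)) hfm]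
        rw [hnseg, hr1, hr2, hflip]
        ring
      · rw [if_neg hcore]
        rw [hr1, hr2, pvSeg_nil a s' e' (by omega)]
        simp [pvRuns]
    · rw [if_neg hse, pvSeg_nil a s e (by omega)]
      simp [pvRuns]

-- ===== VERDICT (by name: the statement is the Claim_ definition above) =====
theorem get_min_number_of_operations_spec : Claim_equal_get_min_number_of_operations := by
  intro a _
  unfold Spec_get_min_number_of_operations
  rw [get_min_number_of_operations]
  rw [pvOuter_eq (a.length + 2) a 0 ((a.length : Int) - 1) 0 le_rfl (by omega)
      (by split_ifs <;> push_cast <;> omega)]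
  have hseg : pvSeg a 0 ((a.length : Int) - 1) = a := by
    have hn : ((a.length : Int) - 1 + 1 - 0).toNat = a.length := by omega
    simp [pvSeg, hn]
  rw [hseg, get_min_number_of_operations_alt, pvAlt_foldl]
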